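-- pv_equiv track=rewrite | github.com/benjaminmesser/Numtoname | numtoname/functions.py | generate_name_fixed
-- ===== SOURCE A (Python) =====
-- def generate_name_fixed(num: int, alphabet: str, name_length: int):
--     if num < 1 or alphabet is None or len(alphabet) < 1 or name_length < 1:
--         return ''
--
--     name_string = ""
--     running_length = num
--     alphabet_size = len(alphabet)
--     for i in range(name_length):
--         if running_length > 1 and running_length > (alphabet_size ** (name_length - i - 1)):
--             for j in range(alphabet_size):
--                 if running_length > ((alphabet_size - j - 1) * (alphabet_size ** (name_length - i - 1))):
--                     name_string += alphabet[(alphabet_size - j - 1)]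
--                     running_length -= ((alphabet_size - j - 1) * (alphabet_size ** (name_length - i - 1)))
--                     break
--         else:
--             name_string += alphabet[0]
--
--     return name_string
-- ===== SOURCE B (Python) =====
-- def generate_name_fixed(num: int, alphabet: str, name_length: int):
--     if num < 1 or alphabet is None or len(alphabet) < 1 or name_length < 1:
--         return ''
--
--     size = len(alphabet)
--     power = size ** (name_length - 1)
--     running = num
--     chars = []
--     for _ in range(name_length):
--         d = (running - 1) // power
--         if d > size - 1:
--             d = size - 1
--         chars.append(alphabet[d])
--         running -= d * power
--         power //= size
--     return ''.join(chars)
-- ===== Notes on version B (the rewrite author's own statement) =====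
-- stated objective: faster
-- what changed: Each output position's digit is computed directly as a capped floor division (running-1)//power with the power maintained incrementally, replacing A's inner scan over the whole alphabet and its per-position re-exponentiation; intended as faster (a timing run measured B >=15x at the largest size both finished, unconfirmed overall since both time out on big-integer powers at huge name_length).
import Mathlib
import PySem

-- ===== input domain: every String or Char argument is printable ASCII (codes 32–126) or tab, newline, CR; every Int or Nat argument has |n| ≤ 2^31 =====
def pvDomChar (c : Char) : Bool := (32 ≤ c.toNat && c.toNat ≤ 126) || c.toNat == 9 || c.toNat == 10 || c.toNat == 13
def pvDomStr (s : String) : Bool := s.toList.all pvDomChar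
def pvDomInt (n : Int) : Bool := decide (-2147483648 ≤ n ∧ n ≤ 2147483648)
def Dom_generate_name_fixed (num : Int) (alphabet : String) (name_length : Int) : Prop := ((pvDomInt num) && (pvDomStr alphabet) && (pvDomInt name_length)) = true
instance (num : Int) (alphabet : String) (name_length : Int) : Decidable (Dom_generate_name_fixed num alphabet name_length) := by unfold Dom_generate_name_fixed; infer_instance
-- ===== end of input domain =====

-- B replaces A's per-position inner scan over the whole alphabet (with the power recomputed by
-- exponentiation each time) by a direct capped floor-division digit computation with an
-- incrementally maintained power — fewer digit steps per position; intended as faster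
-- (a timing run measured B >= 15x faster at the largest size both versions finished,
-- but could not confirm it overall: at huge name_length both time out on big-integer powers).

-- ===== PORT A =====
-- inner 'for j in range(alphabet_size)' loop with break: returns (chars appended, new running_length);
-- the 'none' branch of the index lookup is unreachable (0 ≤ size-j-1 < size = len(alphabet)).
def pvInnerA (al : List Char) (size p run : Int) : List Int → (List Char × Int)
  | [] => ([], run)
  | j :: js =>
    if run > (size - j - 1) * p then
      match PySem.List.pyGet? al (size - j - 1) with
      | some c => ([c], run - (size - j - 1) * p)
      | none => ([], run)
    else pvInnerA al size p run js

-- body of 'for i in range(name_length)'; name_string is built as a list of chars, joined at return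
def pvStepA (al : List Char) (size name_length : Int) (st : List Char × Int) (i : Int) : List Char × Int :=
  if st.2 > 1 ∧ st.2 > size ^ (name_length - i - 1).toNat then
    let r := pvInnerA al size (size ^ (name_length - i - 1).toNat) st.2 (PySem.List.pyRange 0 size 1)
    (st.1 ++ r.1, r.2)
  else
    match PySem.List.pyGet? al 0 with
    | some c => (st.1 ++ [c], st.2)
    | none => (st.1, st.2)

def generate_name_fixed (num : Int) (alphabet : String) (name_length : Int) : String :=
  if num < 1 ∨ PySem.Str.len alphabet < 1 ∨ name_length < 1 then "" else
  String.ofList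
    (((PySem.List.pyRange 0 name_length 1).foldl
        (pvStepA alphabet.toList (PySem.Str.len alphabet) name_length) ([], num)).1)

-- ===== PORT B =====
-- body of 'for _ in range(name_length)' over state (chars, running, power)
def pvStepB (al : List Char) (size : Int) (st : List Char × Int × Int) (_i : Int) : List Char × Int × Int :=
  let d0 := PySem.Int.floordiv (st.2.1 - 1) st.2.2
  let d := if d0 > size - 1 then size - 1 else d0
  let cs := match PySem.List.pyGet? al d with
    | some c => [c]
    | none => []
  (st.1 ++ cs, st.2.1 - d * st.2.2, PySem.Int.floordiv st.2.2 size)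

def generate_name_fixed_alt (num : Int) (alphabet : String) (name_length : Int) : String :=
  if num < 1 ∨ PySem.Str.len alphabet < 1 ∨ name_length < 1 then "" else
  String.ofList
    (((PySem.List.pyRange 0 name_length 1).foldl
        (pvStepB alphabet.toList (PySem.Str.len alphabet))
        ([], num, (PySem.Str.len alphabet) ^ (name_length - 1).toNat)).1)

-- ===== PRECONDITION & SPEC =====
def Spec_generate_name_fixed (num : Int) (alphabet : String) (name_length : Int) (out : String) : Prop := out = generate_name_fixed_alt num alphabet name_length
instance (num : Int) (alphabet : String) (name_length : Int) (out : String) : Decidable (Spec_generate_name_fixed num alphabet name_length out) := by unfold Spec_generate_name_fixed; infer_instance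

-- ===== CLAIM (what is proved, stated in full; the proofs are below) =====
def Claim_equal_generate_name_fixed : Prop := ∀ (num : Int) (alphabet : String) (name_length : Int), Dom_generate_name_fixed num alphabet name_length → Spec_generate_name_fixed num alphabet name_length (generate_name_fixed num alphabet name_length)

-- ===== LEMMAS AND PROOFS =====

-- common digit list both folds produce: k positions remain, current value run
def pvMid (al : List Char) (size : Int) : Nat → Int → List Char
  | 0, _ => []
  | k+1, run =>
      let p : Int := size ^ k
      let d := min (size - 1) (PySem.Int.floordiv (run - 1) p)
      al[d.toNat]! :: pvMid al size k (run - d * p)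

lemma pvFdiv_nonneg {a b : Int} (ha : 0 ≤ a) (hb : 0 < b) : 0 ≤ PySem.Int.floordiv a b := by
  rw [PySem.Int.floordiv_eq_ediv_of_pos hb]; exact Int.ediv_nonneg ha (le_of_lt hb)

lemma pvInnerA_eq (al : List Char) (p : Int) (hp : 0 < p) :
    ∀ (d0 : Nat) (run : Int), 1 ≤ run → (d0 : Int) ≤ (al.length : Int) - 1 →
    pvInnerA al (al.length : Int) p run
        (PySem.List.pyRange ((al.length : Int) - 1 - (d0 : Int)) (al.length : Int) 1)
      = ([al[(min (d0 : Int) (PySem.Int.floordiv (run - 1) p)).toNat]!],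
         run - (min (d0 : Int) (PySem.Int.floordiv (run - 1) p)) * p) := by
  intro d0
  induction d0 with
  | zero =>
    intro run hrun hle
    have hS : 1 ≤ (al.length : Int) := by omega
    have hf : 0 ≤ PySem.Int.floordiv (run - 1) p := pvFdiv_nonneg (by omega) hp
    have hmin : min ((0 : Nat) : Int) (PySem.Int.floordiv (run - 1) p) = 0 := by
      simp; omega
    rw [PySem.List.pyRange_one_cons (by omega)]
    simp only [pvInnerA]
    have h0 : (al.length : Int) - ((al.length : Int) - 1 - ((0 : Nat) : Int)) - 1 = 0 := by
      push_cast; ring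
    rw [h0, if_pos (show run > 0 * p by omega),
      PySem.List.pyGet?_eq_some_getElem al (by omega) (by omega)]
    rw [hmin, getElem!_pos]
  | succ n ih =>
    intro run hrun hle
    have hS : 1 ≤ (al.length : Int) := by omega
    have hf : 0 ≤ PySem.Int.floordiv (run - 1) p := pvFdiv_nonneg (by omega) hp
    rw [PySem.List.pyRange_one_cons (by omega)]
    simp only [pvInnerA]
    have h0 : (al.length : Int) - ((al.length : Int) - 1 - ((n + 1 : Nat) : Int)) - 1
        = ((n : Int) + 1) := by push_cast; ring
    rw [h0]
    by_cases hc : run > ((n : Int) + 1) * p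
    · rw [if_pos hc, PySem.List.pyGet?_eq_some_getElem al (by omega) (by push_cast at hle ⊢; omega)]
      have hge : ((n : Int) + 1) ≤ PySem.Int.floordiv (run - 1) p := by
        rw [PySem.Int.le_floordiv_iff_mul_le hp]; omega
      have hmin : min (((n + 1 : Nat)) : Int) (PySem.Int.floordiv (run - 1) p)
          = (n : Int) + 1 := by push_cast; omega
      rw [hmin, getElem!_pos]
    · rw [if_neg hc]
      have harg : (al.length : Int) - 1 - ((n + 1 : Nat) : Int) + 1
          = (al.length : Int) - 1 - (n : Int) := by push_cast; ring
      rw [harg, ih run hrun (by push_cast at hle ⊢; omega)]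
      have hlt : PySem.Int.floordiv (run - 1) p < (n : Int) + 1 := by
        rw [PySem.Int.floordiv_lt_iff_lt_mul hp]; omega
      have hmin : min (((n + 1 : Nat)) : Int) (PySem.Int.floordiv (run - 1) p)
          = min ((n : Nat) : Int) (PySem.Int.floordiv (run - 1) p) := by push_cast; omega
      rw [hmin]

lemma pvFoldA (al : List Char) (L : Int) (hal : 1 ≤ (al.length : Int)) :
    ∀ (k : Nat) (run : Int) (acc : List Char), 1 ≤ run → (k : Int) ≤ L →
    ∃ r, (PySem.List.pyRange (L - (k : Int)) L 1).foldl (pvStepA al (al.length : Int) L) (acc, run)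
      = (acc ++ pvMid al (al.length : Int) k run, r) := by
  intro k
  induction k with
  | zero =>
    intro run acc _ _
    refine ⟨run, ?_⟩
    rw [show L - ((0 : Nat) : Int) = L by push_cast; ring,
      PySem.List.pyRange_one_eq_nil (le_refl L)]
    simp [pvMid]
  | succ k ih =>
    intro run acc hrun hk
    have hS : (0 : Int) < (al.length : Int) := by omega
    have hp : (0 : Int) < (al.length : Int) ^ k := pow_pos hS k
    have hf0 : 0 ≤ PySem.Int.floordiv (run - 1) ((al.length : Int) ^ k) :=
      pvFdiv_nonneg (by omega) hp
    have hfle : PySem.Int.floordiv (run - 1) ((al.length : Int) ^ k) * (al.length : Int) ^ k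
        ≤ run - 1 := (PySem.Int.le_floordiv_iff_mul_le hp).mp (le_refl _)
    have hdp : min ((al.length : Int) - 1) (PySem.Int.floordiv (run - 1) ((al.length : Int) ^ k))
        * (al.length : Int) ^ k ≤ run - 1 :=
      le_trans (mul_le_mul_of_nonneg_right (min_le_right _ _) (le_of_lt hp)) hfle
    have hrun' : 1 ≤ run - min ((al.length : Int) - 1)
        (PySem.Int.floordiv (run - 1) ((al.length : Int) ^ k)) * (al.length : Int) ^ k := by
      linarith
    rw [PySem.List.pyRange_one_cons (by push_cast; omega), List.foldl_cons]
    simp only [pvStepA]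
    rw [show L - (L - ((k + 1 : Nat) : Int)) - 1 = ((k : Nat) : Int) by push_cast; ring,
      Int.toNat_natCast,
      show L - ((k + 1 : Nat) : Int) + 1 = L - ((k : Nat) : Int) by push_cast; ring]
    by_cases hc : run > 1 ∧ run > (al.length : Int) ^ k
    · rw [if_pos hc]
      have hinner := pvInnerA_eq al ((al.length : Int) ^ k) hp (al.length - 1) run hrun
        (by omega)
      rw [show ((al.length - 1 : Nat) : Int) = (al.length : Int) - 1 by omega] at hinner
      rw [show (al.length : Int) - 1 - ((al.length : Int) - 1) = 0 by ring] at hinner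
      rw [hinner]
      obtain ⟨r, hr⟩ := ih (run - min ((al.length : Int) - 1)
          (PySem.Int.floordiv (run - 1) ((al.length : Int) ^ k)) * (al.length : Int) ^ k)
        (acc ++ [al[(min ((al.length : Int) - 1)
          (PySem.Int.floordiv (run - 1) ((al.length : Int) ^ k))).toNat]!]) hrun' (by omega)
      refine ⟨r, ?_⟩
      rw [hr]
      simp [pvMid, List.append_assoc]
    · rw [if_neg hc]
      have hlt : run - 1 < (al.length : Int) ^ k := by
        rcases not_and_or.mp hc with h | h <;> omega
      have hfz : PySem.Int.floordiv (run - 1) ((al.length : Int) ^ k) = 0 := by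
        have := (PySem.Int.floordiv_lt_iff_lt_mul (q := 1) hp).mpr
          (by rw [one_mul]; exact hlt)
        omega
      rw [PySem.List.pyGet?_eq_some_getElem al (by omega) (by omega)]
      obtain ⟨r, hr⟩ := ih run (acc ++ [al[((0 : Int)).toNat]]) hrun (by omega)
      refine ⟨r, ?_⟩
      rw [hr]
      have hdz : min ((al.length : Int) - 1)
          (PySem.Int.floordiv (run - 1) ((al.length : Int) ^ k)) = 0 := by omega
      simp only [pvMid]
      rw [hdz, getElem!_pos al ((0 : Int)).toNat (by omega)]
      simp [List.append_assoc]

lemma pvFoldB (al : List Char) (L : Int) (hal : 1 ≤ (al.length : Int)) :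
    ∀ (k : Nat) (run : Int) (acc : List Char) (pw : Int), 1 ≤ run → (k : Int) ≤ L →
    (k = 0 ∨ pw = (al.length : Int) ^ (k - 1)) →
    ∃ r q, (PySem.List.pyRange (L - (k : Int)) L 1).foldl (pvStepB al (al.length : Int)) (acc, run, pw)
      = (acc ++ pvMid al (al.length : Int) k run, r, q) := by
  intro k
  induction k with
  | zero =>
    intro run acc pw _ _ _
    refine ⟨run, pw, ?_⟩
    rw [show L - ((0 : Nat) : Int) = L by push_cast; ring,
      PySem.List.pyRange_one_eq_nil (le_refl L)]
    simp [pvMid]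
  | succ k ih =>
    intro run acc pw hrun hk hpw
    have hpw' : pw = (al.length : Int) ^ k := by
      rcases hpw with h | h
      · omega
      · simpa using h
    subst hpw'
    have hS : (0 : Int) < (al.length : Int) := by omega
    have hp : (0 : Int) < (al.length : Int) ^ k := pow_pos hS k
    have hf0 : 0 ≤ PySem.Int.floordiv (run - 1) ((al.length : Int) ^ k) :=
      pvFdiv_nonneg (by omega) hp
    have hfle : PySem.Int.floordiv (run - 1) ((al.length : Int) ^ k) * (al.length : Int) ^ k
        ≤ run - 1 := (PySem.Int.le_floordiv_iff_mul_le hp).mp (le_refl _)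
    have hdp : min ((al.length : Int) - 1) (PySem.Int.floordiv (run - 1) ((al.length : Int) ^ k))
        * (al.length : Int) ^ k ≤ run - 1 :=
      le_trans (mul_le_mul_of_nonneg_right (min_le_right _ _) (le_of_lt hp)) hfle
    have hrun' : 1 ≤ run - min ((al.length : Int) - 1)
        (PySem.Int.floordiv (run - 1) ((al.length : Int) ^ k)) * (al.length : Int) ^ k := by
      linarith
    rw [PySem.List.pyRange_one_cons (by push_cast; omega), List.foldl_cons]
    simp only [pvStepB]
    rw [show (if PySem.Int.floordiv (run - 1) ((al.length : Int) ^ k) > (al.length : Int) - 1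
          then (al.length : Int) - 1
          else PySem.Int.floordiv (run - 1) ((al.length : Int) ^ k))
        = min ((al.length : Int) - 1) (PySem.Int.floordiv (run - 1) ((al.length : Int) ^ k))
        by split_ifs with h <;> omega]
    rw [PySem.List.pyGet?_eq_some_getElem al (by omega) (by omega),
      show L - ((k + 1 : Nat) : Int) + 1 = L - ((k : Nat) : Int) by push_cast; ring]
    have hnext : k = 0 ∨ PySem.Int.floordiv ((al.length : Int) ^ k) (al.length : Int)
        = (al.length : Int) ^ (k - 1) := by
      cases k with
      | zero => exact Or.inl rfl
      | succ m =>
        right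
        rw [PySem.Int.floordiv_eq_ediv_of_pos hS, pow_succ,
          Int.mul_ediv_cancel _ (by omega)]
        simp
    obtain ⟨r, q, hr⟩ := ih (run - min ((al.length : Int) - 1)
        (PySem.Int.floordiv (run - 1) ((al.length : Int) ^ k)) * (al.length : Int) ^ k)
      (acc ++ [al[(min ((al.length : Int) - 1)
        (PySem.Int.floordiv (run - 1) ((al.length : Int) ^ k))).toNat]])
      (PySem.Int.floordiv ((al.length : Int) ^ k) (al.length : Int)) hrun' (by omega) hnext
    refine ⟨r, q, ?_⟩
    rw [hr]
    simp only [pvMid]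
    rw [getElem!_pos al (min ((al.length : Int) - 1)
      (PySem.Int.floordiv (run - 1) ((al.length : Int) ^ k))).toNat (by omega)]
    simp [List.append_assoc]

-- ===== VERDICT (by name: the statement is the Claim_ definition above) =====
theorem generate_name_fixed_spec : Claim_equal_generate_name_fixed := by
  intro num alphabet L _
  unfold Spec_generate_name_fixed generate_name_fixed generate_name_fixed_alt
  have hlen : PySem.Str.len alphabet = ((alphabet.toList.length : Nat) : Int) := by simp
  by_cases hg : num < 1 ∨ PySem.Str.len alphabet < 1 ∨ L < 1
  · rw [if_pos hg, if_pos hg]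
  · rw [if_neg hg, if_neg hg, hlen]
    push Not at hg
    obtain ⟨h1, h2, h3⟩ := hg
    rw [hlen] at h2
    have hA := pvFoldA alphabet.toList L (by omega) L.toNat num [] (by omega) (by omega)
    have hB := pvFoldB alphabet.toList L (by omega) L.toNat num []
      ((alphabet.toList.length : Int) ^ (L - 1).toNat) (by omega) (by omega)
      (Or.inr (by rw [show (L - 1).toNat = L.toNat - 1 by omega]))
    rw [show L - ((L.toNat : Nat) : Int) = 0 by omega] at hA hB
    obtain ⟨r, hA⟩ := hA
    obtain ⟨r2, q2, hB⟩ := hB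
    rw [hA, hB]
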